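-- pv_equiv track=rewrite | github.com/socrateasehq/coding-problems-template | difficulty_2/1_n_unique_vowels/langs/python3.py | n_unique_vowels
-- ===== SOURCE A (Python) =====
-- def n_unique_vowels(list_str, n):
--
--     # Write the logic here
--     # return an integer containing the number of strings which have n unique vowels
--     num_strings = 0
--     vowels = ['a', 'e', 'i', 'o', 'u']
--     for string in list_str:
--         vowel_count = 0
--         seen_vowels = {}
--         for char in string:
--             if char in vowels and char not in seen_vowels:
--                 vowel_count += 1
--                 seen_vowels[char] = True
--
--         if vowel_count == n:
--             num_strings += 1
--
--     return num_strings
-- ===== SOURCE B (Python) =====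
-- def n_unique_vowels(list_str, n):
--     vowels = "aeiou"
--     return sum(1 for s in list_str if sum(v in s for v in vowels) == n)
-- ===== Notes on version B (the rewrite author's own statement) =====
-- stated objective: alternative
-- what changed: Inverts the traversal: instead of scanning each string's characters while maintaining a seen-vowels dict and a running counter, B queries, for each of the five vowels, whether it occurs in the string (substring membership) and sums these five booleans, then counts matching strings with a filtering generator.
import Mathlib
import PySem

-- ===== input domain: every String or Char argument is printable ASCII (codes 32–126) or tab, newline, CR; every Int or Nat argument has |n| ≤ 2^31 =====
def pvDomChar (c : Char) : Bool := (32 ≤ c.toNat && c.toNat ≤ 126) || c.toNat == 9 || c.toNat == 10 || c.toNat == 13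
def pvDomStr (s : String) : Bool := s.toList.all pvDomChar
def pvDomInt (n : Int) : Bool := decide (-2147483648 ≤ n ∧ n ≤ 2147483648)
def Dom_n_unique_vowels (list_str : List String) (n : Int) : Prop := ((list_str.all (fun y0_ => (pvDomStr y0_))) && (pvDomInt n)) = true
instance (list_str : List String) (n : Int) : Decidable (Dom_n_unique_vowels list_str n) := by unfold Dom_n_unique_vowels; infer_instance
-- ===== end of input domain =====

-- B inverts the traversal: per string it asks for each of the five vowels whether it occurs
-- (membership query), instead of A's per-character scan with a seen-dict; objective: alternative.

-- ===== PORT A =====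
-- vowels = ['a', 'e', 'i', 'o', 'u']
def pvVowelsA : List Char := ['a', 'e', 'i', 'o', 'u']

-- the inner 'for char in string' loop: state (vowel_count, seen_vowels)
def pvInnerStepA (p : Int × PySem.Dict Char Bool) (char : Char) : Int × PySem.Dict Char Bool :=
  if pvVowelsA.contains char && !(p.2.contains char) then (p.1 + 1, p.2.insert char true) else p

def n_unique_vowels (list_str : List String) (n : Int) : Int :=
  list_str.foldl
    (fun num_strings string =>
      let st := string.toList.foldl pvInnerStepA (0, PySem.Dict.empty)
      if st.1 = n then num_strings + 1 else num_strings)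
    0

-- ===== PORT B =====
-- vowels = "aeiou"
def pvVowelsB : List Char := "aeiou".toList

-- sum(v in s for v in vowels): five membership queries, summed
def pvVowelSumB (s : String) : Int :=
  (pvVowelsB.filter (fun v => s.toList.contains v)).length

-- sum(1 for s in list_str if … == n): length of the filtered list
def n_unique_vowels_alt (list_str : List String) (n : Int) : Int :=
  ((list_str.filter (fun s => pvVowelSumB s = n)).length : Int)

-- ===== PRECONDITION & SPEC =====
def Spec_n_unique_vowels (list_str : List String) (n : Int) (out : Int) : Prop := out = n_unique_vowels_alt list_str n
instance (list_str : List String) (n : Int) (out : Int) : Decidable (Spec_n_unique_vowels list_str n out) := by unfold Spec_n_unique_vowels; infer_instance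

-- ===== CLAIM =====
def Claim_equal_n_unique_vowels : Prop := ∀ (list_str : List String) (n : Int), Dom_n_unique_vowels list_str n → Spec_n_unique_vowels list_str n (n_unique_vowels list_str n)

-- ===== LEMMAS AND PROOFS =====

-- A's inner loop, generalized: the counter advances by the number of fresh vowels.
theorem pvInner_fst (cs : List Char) (acc : Int) (d : PySem.Dict Char Bool) :
    (cs.foldl pvInnerStepA (acc, d)).1
      = acc + (((cs.filter (fun c => pvVowelsA.contains c)).foldl PySem.Set.add d.keys).length
               - (d.keys.length : Int)) := by
  induction cs generalizing acc d with
  | nil => simp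
  | cons c rest ih =>
    by_cases hm : c ∈ pvVowelsA
    · by_cases hc : d.contains c = true
      · have hck : c ∈ d.keys := by
          rw [PySem.Dict.contains_eq_decide_mem_keys] at hc
          exact of_decide_eq_true hc
        have hadd : PySem.Set.add d.keys c = d.keys := by
          simp [PySem.Set.add, hck]
        simp [pvInnerStepA, hm, hc, List.foldl_cons, hadd, ih]
      · have hc' : d.contains c = false := by simpa using hc
        have hkeys : (d.insert c true).keys = d.keys ++ [c] :=
          PySem.Dict.keys_insert_of_not_contains d true hc'
        have hck : c ∉ d.keys := by
          rw [PySem.Dict.contains_eq_decide_mem_keys] at hc'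
          simpa using hc'
        have hadd : PySem.Set.add d.keys c = d.keys ++ [c] := by
          simp [PySem.Set.add, hck]
        simp only [List.foldl_cons, List.filter_cons]
        have hstep : pvInnerStepA (acc, d) c = (acc + 1, d.insert c true) := by
          simp [pvInnerStepA, hm, hc']
        rw [hstep, ih]
        simp [hkeys, hadd, hm]
        omega
    · have hstep : pvInnerStepA (acc, d) c = (acc, d) := by
        simp [pvInnerStepA, hm]
      simp [List.foldl_cons, hstep, hm, ih]

-- The dedup of the vowel-filtered characters has the same length as the list of vowels present:
-- both are nodup lists with the same membership {v ∈ vowels | v ∈ cs}.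
theorem pvDedup_len (cs : List Char) :
    ((cs.filter (fun c => decide (c ∈ pvVowelsA))).foldl PySem.Set.add []).length
      = (pvVowelsA.filter (fun v => decide (v ∈ cs))).length := by
  have h1 : (cs.filter (fun c => decide (c ∈ pvVowelsA))).foldl PySem.Set.add []
      = PySem.Set.ofList (cs.filter (fun c => decide (c ∈ pvVowelsA))) :=
    (PySem.Set.ofList_eq_foldl _).symm
  rw [h1]
  have hn1 : (PySem.Set.ofList (cs.filter (fun c => decide (c ∈ pvVowelsA)))).Nodup :=
    PySem.Set.nodup_ofList _
  have hn2 : (pvVowelsA.filter (fun v => decide (v ∈ cs))).Nodup :=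
    List.Nodup.filter _ (by decide)
  have hperm : List.Perm (PySem.Set.ofList (cs.filter (fun c => decide (c ∈ pvVowelsA))))
      (pvVowelsA.filter (fun v => decide (v ∈ cs))) := by
    apply List.perm_of_nodup_nodup_toFinset_eq hn1 hn2
    ext x
    simp [List.mem_toFinset, PySem.Set.mem_ofList, List.mem_filter, and_comm]
  exact hperm.length_eq

-- per-string agreement: A's inner counter equals B's vowel-membership sum.
theorem pvPerString (s : String) :
    (s.toList.foldl pvInnerStepA (0, PySem.Dict.empty)).1 = pvVowelSumB s := by
  have hBA : pvVowelsB = pvVowelsA := by decide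
  have h1 := pvInner_fst s.toList 0 PySem.Dict.empty
  have hkeys : (PySem.Dict.empty : PySem.Dict Char Bool).keys = [] := rfl
  rw [h1, hkeys]
  simp only [List.contains_eq_mem] at *
  simp [pvVowelSumB, hBA, pvDedup_len s.toList, List.contains_eq_mem]

-- counting loop vs filtered length.
theorem pvCount_eq_filter (l : List String) (f : String → Int) (n : Int) (acc : Int) :
    (l.foldl (fun a s => if f s = n then a + 1 else a) acc)
      = acc + ((l.filter (fun s => f s = n)).length : Int) := by
  induction l generalizing acc with
  | nil => simp
  | cons s rest ih =>
    by_cases h : f s = n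
    · simp [List.foldl_cons, h, ih]; ring
    · simp [List.foldl_cons, h, ih]

-- ===== VERDICT =====
theorem n_unique_vowels_spec : Claim_equal_n_unique_vowels := by
  intro list_str n _
  unfold Spec_n_unique_vowels n_unique_vowels n_unique_vowels_alt
  have h := pvCount_eq_filter list_str
    (fun s => (s.toList.foldl pvInnerStepA (0, PySem.Dict.empty)).1) n 0
  simp only [zero_add] at h
  rw [h]
  congr 2
  apply List.filter_congr
  intro s _
  simp [pvPerString s]
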